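-- pv_equiv track=rewrite | github.com/GaneshTappiti/RAG | extract_ai_tools_documentation.py | _identify_primary_files
-- ===== SOURCE A (Python) =====
-- from typing import Dict, List, Tuple
--
-- def _identify_primary_files(files: List[str]) -> List[str]:
--     """Identify primary documentation files for a tool."""
--     primary_files = []
--
--     # Look for common primary file patterns
--     priority_patterns = [
--         'prompt.txt', 'prompt.md', 'system.txt', 'system.md',
--         'readme.md', 'readme.txt', 'agent.txt', 'agent.md',
--         'instructions.txt', 'instructions.md'
--     ]
--
--     for pattern in priority_patterns:
--         for file_name in files:
--             if file_name.lower().endswith(pattern.lower()):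
--                 primary_files.append(file_name)
--
--     return primary_files
-- ===== SOURCE B (Python) =====
-- from typing import Dict, List, Tuple
--
-- def _identify_primary_files(files: List[str]) -> List[str]:
--     """Identify primary documentation files for a tool (single pass + buckets)."""
--     priority_patterns = [
--         'prompt.txt', 'prompt.md', 'system.txt', 'system.md',
--         'readme.md', 'readme.txt', 'agent.txt', 'agent.md',
--         'instructions.txt', 'instructions.md'
--     ]
--     buckets = {pattern: [] for pattern in priority_patterns}
--     for file_name in files:
--         name = file_name.lower()
--         for pattern in priority_patterns:
--             if name.endswith(pattern):
--                 buckets[pattern].append(file_name)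
--                 break
--     result = []
--     for pattern in priority_patterns:
--         result.extend(buckets[pattern])
--     return result
-- ===== Notes on version B (the rewrite author's own statement) =====
-- stated objective: faster
-- what changed: Replaces A's ten sequential scans of files (one per pattern, lowercasing each file name on every scan) by a single pass that lowercases each file name once and buckets it under the first pattern it ends with (with break), then concatenates the buckets in pattern order (valid because no pattern is a suffix of another).
import Mathlib
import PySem

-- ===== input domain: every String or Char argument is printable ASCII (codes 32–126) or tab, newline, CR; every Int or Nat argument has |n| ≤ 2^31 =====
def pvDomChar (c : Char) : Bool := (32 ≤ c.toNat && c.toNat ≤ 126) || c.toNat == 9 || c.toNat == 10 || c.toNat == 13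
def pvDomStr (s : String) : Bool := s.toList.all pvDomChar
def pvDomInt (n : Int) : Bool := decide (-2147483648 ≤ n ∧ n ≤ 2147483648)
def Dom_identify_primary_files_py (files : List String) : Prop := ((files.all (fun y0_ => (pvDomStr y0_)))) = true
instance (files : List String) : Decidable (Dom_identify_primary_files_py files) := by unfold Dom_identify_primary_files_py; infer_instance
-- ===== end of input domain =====

-- B replaces A's ten full scans of `files` (one per pattern) by ONE pass over `files` that buckets
-- each file under the first pattern its lowercased name ends with (no pattern is a suffix of
-- another, so the first match is the only match), then concatenates the buckets in pattern order.

-- the priority pattern list (a literal shared by both ports)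
def pvPatterns : List String :=
  ["prompt.txt", "prompt.md", "system.txt", "system.md",
   "readme.md", "readme.txt", "agent.txt", "agent.md",
   "instructions.txt", "instructions.md"]

-- ===== PORT A =====
def identify_primary_files_py (files : List String) : List String :=
  pvPatterns.foldl
    (fun primary_files pattern =>
      files.foldl
        (fun acc file_name =>
          if PySem.Str.endswith (PySem.Str.lower file_name) (PySem.Str.lower pattern)
          then acc ++ [file_name] else acc)
        primary_files)
    []

-- ===== PORT B =====
-- B-side helper: Source B's inner 'for pattern in priority_patterns: if name.endswith(pattern): …; break'
def pvFirstMatch (name : String) : Option String :=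
  pvPatterns.find? (fun pattern => PySem.Str.endswith name pattern)

def identify_primary_files_py_alt (files : List String) : List String :=
  let buckets0 : PySem.Dict String (List String) :=
    pvPatterns.foldl (fun d pattern => d.insert pattern ([] : List String)) PySem.Dict.empty
  let buckets :=
    files.foldl
      (fun d file_name =>
        match pvFirstMatch (PySem.Str.lower file_name) with
        | some pattern => d.modify pattern [] (fun l => l ++ [file_name])
        | none => d)
      buckets0
  pvPatterns.foldl (fun result pattern => result ++ buckets.getD pattern []) []

-- ===== PRECONDITION & SPEC =====
def Spec_identify_primary_files_py (files : List String) (out : List String) : Prop := out = identify_primary_files_py_alt files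
instance (files : List String) (out : List String) : Decidable (Spec_identify_primary_files_py files out) := by unfold Spec_identify_primary_files_py; infer_instance

-- ===== CLAIM (what is proved, stated in full; the proofs are below) =====
def Claim_equal_identify_primary_files_py : Prop := ∀ (files : List String), Dom_identify_primary_files_py files → Spec_identify_primary_files_py files (identify_primary_files_py files)

-- ===== LEMMAS AND PROOFS =====

-- a shorter suffix of s is a suffix of any longer suffix of s
theorem pv_suffix_of_suffix_le (l1 l2 s : List Char) (h1 : l1 <:+ s) (h2 : l2 <:+ s)
    (hle : l1.length ≤ l2.length) : l1 <:+ l2 := by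
  have hl2 : l2.length ≤ s.length := h2.length_le
  rw [List.suffix_iff_eq_drop] at h1 h2 ⊢
  calc l1 = s.drop (s.length - l1.length) := h1
    _ = (s.drop (s.length - l2.length)).drop (l2.length - l1.length) := by
          rw [List.drop_drop]; congr 1; omega
    _ = l2.drop (l2.length - l1.length) := by rw [← h2]

-- no pattern is a (proper) suffix of another
theorem pv_pairwise : ∀ p ∈ pvPatterns, ∀ q ∈ pvPatterns, p.toList <:+ q.toList → p = q := by
  decide

-- every pattern is already lowercase
theorem pv_lower : ∀ p ∈ pvPatterns, PySem.Str.lower p = p := by decide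

-- two patterns matching the same string are equal
theorem pv_unique (s : String) (p q : String) (hp : p ∈ pvPatterns) (hq : q ∈ pvPatterns)
    (hmp : PySem.Str.endswith s p = true) (hmq : PySem.Str.endswith s q = true) : q = p := by
  rw [PySem.Str.endswith_eq, PySem.Chars.endswith_iff] at hmp hmq
  rcases le_total q.toList.length p.toList.length with h | h
  · exact pv_pairwise q hq p hp (pv_suffix_of_suffix_le _ _ _ hmq hmp h)
  · exact (pv_pairwise p hp q hq (pv_suffix_of_suffix_le _ _ _ hmp hmq h)).symm

-- find? returns p when p matches (generic over the scanned list, given uniqueness)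
theorem pv_find_eq (pats : List String) (s p : String) (hp : p ∈ pats)
    (hm : PySem.Str.endswith s p = true)
    (huniq : ∀ q ∈ pats, PySem.Str.endswith s q = true → q = p) :
    pats.find? (fun q => PySem.Str.endswith s q) = some p := by
  induction pats with
  | nil => cases hp
  | cons a t ih =>
    rw [List.find?_cons]
    cases ha : PySem.Str.endswith s a with
    | true =>
      exact congrArg some (huniq a List.mem_cons_self ha)
    | false =>
      rcases List.mem_cons.mp hp with rfl | hpt
      · rw [hm] at ha; cases ha
      · exact ih hpt (fun q hq => huniq q (List.mem_cons_of_mem a hq))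

-- the bucket predicate coincides with A's per-pattern predicate, for p a pattern
theorem pv_pred_eq (f p : String) (hp : p ∈ pvPatterns) :
    ((pvFirstMatch (PySem.Str.lower f) == some p) : Bool)
      = PySem.Str.endswith (PySem.Str.lower f) (PySem.Str.lower p) := by
  rw [pv_lower p hp]
  by_cases hm : PySem.Str.endswith (PySem.Str.lower f) p = true
  · rw [hm]
    have : pvFirstMatch (PySem.Str.lower f) = some p :=
      pv_find_eq pvPatterns _ p hp hm (fun q hq hmq => pv_unique _ _ _ hp hq hm hmq)
    simp [this]
  · rw [Bool.not_eq_true] at hm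
    rw [hm, beq_eq_false_iff_ne]
    intro hfind
    have h2 : PySem.Str.endswith (PySem.Str.lower f) p = true := List.find?_some hfind
    rw [hm] at h2
    cases h2

-- A unrolled: concatenation over patterns of the matching files
theorem pv_A_flat (files : List String) :
    identify_primary_files_py files
      = pvPatterns.flatMap (fun pattern =>
          files.filter (fun f => PySem.Str.endswith (PySem.Str.lower f) (PySem.Str.lower pattern))) := by
  unfold identify_primary_files_py
  simp only [PySem.List.foldl_append_if_eq_filter]
  rw [PySem.List.foldl_append_eq_flatMap]
  simp

-- the initial bucket dict maps every key to []
theorem pv_init_getD (l : List String) (d : PySem.Dict String (List String)) (p : String)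
    (h : d.getD p [] = []) :
    (l.foldl (fun d q => d.insert q ([] : List String)) d).getD p [] = [] := by
  induction l generalizing d with
  | nil => exact h
  | cons a t ih =>
    rw [List.foldl_cons]
    apply ih
    rw [PySem.Dict.getD_insert]
    split_ifs <;> [rfl; exact h]

-- the bucket of p after the single pass is the matching files in order
theorem pv_bucket_getD (files : List String) (d : PySem.Dict String (List String)) (p : String) :
    (files.foldl
        (fun d file_name =>
          match pvFirstMatch (PySem.Str.lower file_name) with
          | some pattern => d.modify pattern [] (fun l => l ++ [file_name])
          | none => d)
        d).getD p []
      = d.getD p [] ++ files.filter (fun f => pvFirstMatch (PySem.Str.lower f) == some p) := by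
  induction files generalizing d with
  | nil => simp
  | cons f t ih =>
    rw [List.foldl_cons, List.filter_cons]
    cases hfm : pvFirstMatch (PySem.Str.lower f) with
    | none =>
      rw [ih]
      simp
    | some q =>
      rw [ih]
      by_cases hpq : p = q
      · subst hpq
        simp
      · simp [PySem.Dict.getD_modify, hpq, Ne.symm hpq]

-- B unrolled: concatenation over patterns of the bucketed files
theorem pv_B_flat (files : List String) :
    identify_primary_files_py_alt files
      = pvPatterns.flatMap (fun pattern =>
          files.filter (fun f => pvFirstMatch (PySem.Str.lower f) == some pattern)) := by
  unfold identify_primary_files_py_alt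
  rw [PySem.List.foldl_append_eq_flatMap]
  rw [List.nil_append]
  apply List.flatMap_congr
  intro p _
  rw [pv_bucket_getD, pv_init_getD _ _ _ (PySem.Dict.getD_empty _ _), List.nil_append]

-- ===== VERDICT (by name: the statement is the Claim_ definition above) =====
theorem identify_primary_files_py_spec : Claim_equal_identify_primary_files_py := by
  intro files _
  unfold Spec_identify_primary_files_py
  rw [pv_A_flat, pv_B_flat]
  apply List.flatMap_congr
  intro p hp
  apply List.filter_congr
  intro f _
  exact (pv_pred_eq f p hp).symm
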